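-- pv_equiv track=rewrite | github.com/prempyla/collabrate- | print_all_partition_string.py | all_partitions
-- ===== SOURCE A (Python) =====
-- def all_partitions(s):
--     results = []
--     def backtrack(start, path):
--         if start == len(s):
--             results.append(path[:])
--             return
--         for end in range(start+1, len(s)+1):
--             path.append(s[start:end])
--             backtrack(end, path)
--             path.pop()
--     backtrack(0, [])
--     return results
-- ===== SOURCE B (Python) =====
-- def all_partitions(s):
--     # Right-to-left DP: maintain the list of partitions of the current suffix,
--     # doubling it per character (new one-char segment, or merge into first segment).
--     if not s:
--         return [[]]
--     parts = [[s[-1]]]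
--     for c in reversed(s[:-1]):
--         parts = [[c] + p for p in parts] + [[c + p[0]] + p[1:] for p in parts]
--     return parts
-- ===== Notes on version B (the rewrite author's own statement) =====
-- stated objective: alternative
-- what changed: Replaces A's recursive backtracking with a mutable path (prefix-extension, one partition at a time) by a single right-to-left pass that keeps the full list of partitions of the current suffix and doubles it per character (prepend a one-char segment, or merge the character into the first segment), preserving A's output order.
import Mathlib
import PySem

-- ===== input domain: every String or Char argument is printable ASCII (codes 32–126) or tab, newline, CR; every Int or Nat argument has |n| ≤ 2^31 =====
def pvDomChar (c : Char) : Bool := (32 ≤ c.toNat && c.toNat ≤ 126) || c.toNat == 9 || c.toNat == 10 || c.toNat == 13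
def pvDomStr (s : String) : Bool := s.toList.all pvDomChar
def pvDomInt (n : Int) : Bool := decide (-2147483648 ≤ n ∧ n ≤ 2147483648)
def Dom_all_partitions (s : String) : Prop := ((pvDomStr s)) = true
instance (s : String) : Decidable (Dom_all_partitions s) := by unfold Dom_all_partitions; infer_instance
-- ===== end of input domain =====

-- B replaces A's mutating recursive backtracking by a right-to-left fold that doubles the
-- partition list per character (alternative decomposition; same output-bound cost).


-- ===== PORT A =====
-- backtrack(start, path) with the result list as an accumulator; fuel is only a
-- termination guard (every call has fuel > len(s) - start, so it is never exhausted).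
def btA (s : String) : Nat → Int → List String → List (List String) → List (List String)
  | 0, _, _, res => res
  | fuel+1, start, path, res =>
      if start = PySem.Str.len s then res ++ [path]
      else (PySem.List.pyRange (start + 1) (PySem.Str.len s + 1) 1).foldl
        (fun acc e => btA s fuel e (path ++ [PySem.Str.slice s (some start) (some e)]) acc) res

def all_partitions (s : String) : List (List String) :=
  btA s (s.toList.length + 1) 0 [] []

-- ===== PORT B =====
-- [c + p[0]] + p[1:]  (the [] case is unreachable: partitions of a nonempty suffix are nonempty)
def mergeHeadB (c : Char) : List String → List String
  | [] => [String.ofList [c]]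
  | h :: t => String.ofList (c :: h.toList) :: t

-- parts = [[c] + p for p in parts] + [[c + p[0]] + p[1:] for p in parts]
def stepB (parts : List (List String)) (c : Char) : List (List String) :=
  parts.map (fun p => String.ofList [c] :: p) ++ parts.map (mergeHeadB c)

def all_partitions_alt (s : String) : List (List String) :=
  match s.toList.reverse with
  | [] => [[]]                                                      -- if not s: return [[]]
  | last :: restRev => restRev.foldl stepB [[String.ofList [last]]] -- restRev = reversed(s[:-1])

-- ===== PRECONDITION & SPEC =====
def Spec_all_partitions (s : String) (out : List (List String)) : Prop := out = all_partitions_alt s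
instance (s : String) (out : List (List String)) : Decidable (Spec_all_partitions s out) := by unfold Spec_all_partitions; infer_instance

-- ===== CLAIM (what is proved, stated in full; the proofs are below) =====
def Claim_equal_all_partitions : Prop := ∀ (s : String), Dom_all_partitions s → Spec_all_partitions s (all_partitions s)

-- ===== LEMMAS AND PROOFS =====

-- reference: the partitions of a character list, in the common order of A and B
def specP : List Char → List (List String)
  | [] => [[]]
  | [c] => [[String.ofList [c]]]
  | c :: d :: r => (specP (d :: r)).map (fun p => String.ofList [c] :: p) ++ (specP (d :: r)).map (mergeHeadB c)

lemma specP_cons_ne_nil (c : Char) (l : List Char) (hl : l ≠ []) :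
    specP (c :: l) = (specP l).map (fun p => String.ofList [c] :: p) ++ (specP l).map (mergeHeadB c) := by
  cases l with
  | nil => exact absurd rfl hl
  | cons d r => rfl

-- B side: the fold over the reversed prefix computes specP
lemma foldl_stepB_spec (l : List Char) (last : Char) :
    l.reverse.foldl stepB [[String.ofList [last]]] = specP (l ++ [last]) := by
  induction l with
  | nil => rfl
  | cons c r ih =>
      have h : (c :: r).reverse = r.reverse ++ [c] := by simp
      rw [h, List.foldl_append, ih, List.cons_append,
        specP_cons_ne_nil c (r ++ [last]) (by simp)]
      rfl

lemma alt_eq_specP (s : String) : all_partitions_alt s = specP s.toList := by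
  unfold all_partitions_alt
  rcases h : s.toList.reverse with _ | ⟨last, restRev⟩
  · have h0 : s.toList = [] := by
      have := congrArg List.reverse h; simpa using this
    simp [h0, specP]
  · have hs : s.toList = restRev.reverse ++ [last] := by
      have := congrArg List.reverse h; simpa using this
    rw [hs, ← foldl_stepB_spec restRev.reverse last, List.reverse_reverse]

-- A side: specP decomposed into blocks by the length of the first segment
lemma specP_blocks (l : List Char) (hl : l ≠ []) :
    specP l = (List.range l.length).flatMap
      (fun k => (specP (l.drop (k+1))).map (fun p => String.ofList (l.take (k+1)) :: p)) := by
  induction l with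
  | nil => exact absurd rfl hl
  | cons c r ih =>
      cases r with
      | nil => rfl
      | cons d r' =>
          rw [specP_cons_ne_nil c (d :: r') (by simp)]
          have hlen : (c :: d :: r').length = (d :: r').length + 1 := rfl
          rw [hlen, List.range_succ_eq_map, List.flatMap_cons, List.flatMap_map]
          congr 1
          rw [ih (by simp), List.map_flatMap]
          apply List.flatMap_congr
          intro k _
          rw [List.map_map]
          apply List.map_congr_left
          intro p _
          simp [mergeHeadB]

lemma btA_spec (s : String) :
    ∀ (fuel start : Nat), start ≤ s.toList.length → s.toList.length - start < fuel →
    ∀ (path : List String) (res : List (List String)),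
      btA s fuel (start : Int) path res = res ++ (specP (s.toList.drop start)).map (path ++ ·) := by
  intro fuel
  induction fuel with
  | zero => intro start _ h; omega
  | succ f ih =>
      intro start hle hf path res
      by_cases hend : start = s.toList.length
      · subst hend
        simp only [btA]
        rw [if_pos (by rw [PySem.Str.len_eq]), List.drop_length]
        simp [specP]
      · have hlt : start < s.toList.length := lt_of_le_of_ne hle hend
        simp only [btA]
        rw [if_neg (by rw [PySem.Str.len_eq]; exact_mod_cast hend), PySem.Str.len_eq,
          PySem.List.pyRange_one]
        have htn : ((s.toList.length : Int) + 1 - ((start : Int) + 1)).toNat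
            = s.toList.length - start := by omega
        rw [htn, List.foldl_map]
        have hfold := PySem.List.foldl_congr_mem'
          (l := List.range (s.toList.length - start)) (init := res)
          (f := fun acc k => btA s f ((start : Int) + 1 + (k : Int))
            (path ++ [PySem.Str.slice s (some (start : Int)) (some ((start : Int) + 1 + (k : Int)))]) acc)
          (g := fun acc k => acc ++ (specP (s.toList.drop (start+1+k))).map
            (fun p => path ++ (String.ofList ((s.toList.drop start).take (k+1)) :: p)))
          (by
            intro k hk acc
            dsimp only
            have hk' : k < s.toList.length - start := List.mem_range.mp hk
            have hcast : (start : Int) + 1 + (k : Int) = ((start + 1 + k : Nat) : Int) := by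
              push_cast; ring
            have hseg : PySem.Str.slice s (some (start : Int)) (some ((start : Int) + 1 + (k : Int)))
                = String.ofList ((s.toList.drop start).take (k+1)) := by
              have h1 : (PySem.Str.slice s (some (start : Int)) (some ((start : Int) + 1 + (k : Int)))).toList
                  = (s.toList.drop start).take (k+1) := by
                rw [PySem.Str.toList_slice, PySem.Chars.slice_eq_listSlice, hcast,
                  PySem.List.slice_natCast]
                congr 1
                omega
              have h2 := congrArg String.ofList h1
              rwa [String.ofList_toList] at h2
            rw [hseg, hcast, ih (start+1+k) (by omega) (by omega)]
            congr 1
            apply List.map_congr_left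
            intro p _
            simp)
        rw [hfold, PySem.List.foldl_append_eq_flatMap]
        congr 1
        rw [specP_blocks (s.toList.drop start) (by rw [Ne, List.drop_eq_nil_iff]; omega),
          List.length_drop, List.map_flatMap]
        apply List.flatMap_congr
        intro k hk
        have hX : (s.toList.drop start).drop (k+1) = s.toList.drop (start+1+k) := by
          rw [List.drop_drop]; congr 1; omega
        rw [List.map_map, hX]
        apply List.map_congr_left
        intro p _
        simp

lemma a_eq_specP (s : String) : all_partitions s = specP s.toList := by
  unfold all_partitions
  have h := btA_spec s (s.toList.length + 1) 0 (by omega) (by omega) [] []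
  simpa using h

-- ===== VERDICT (by name: the statement is the Claim_ definition above) =====
theorem all_partitions_spec : Claim_equal_all_partitions := by
  intro s _
  unfold Spec_all_partitions
  rw [a_eq_specP, alt_eq_specP]
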